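-- pv_equiv track=rewrite | github.com/amareshsingh0/photogeniusai | aws/lambda/orchestrator/semantic_prompt_enhancer.py | suggest_style_lora
-- ===== SOURCE A (Python) =====
-- from typing import Any, Dict, List, Optional, Tuple
--
-- STYLE_KEYWORDS_TO_LORA: Dict[str, str] = {
--     "cinematic": "cinematic",
--     "film": "cinematic",
--     "movie": "cinematic",
--     "anime": "anime",
--     "manga": "anime",
--     "photorealistic": "photorealistic",
--     "8k": "photorealistic",
--     "professional photography": "photorealistic",
--     "oil painting": "oil_painting",
--     "oil paint": "oil_painting",
--     "classical art": "oil_painting",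
--     "watercolor": "watercolor",
--     "watercolour": "watercolor",
--     "digital art": "digital_art",
--     "vector": "digital_art",
--     "concept art": "concept_art",
--     "game design": "concept_art",
--     "pixel art": "pixel_art",
--     "pixel": "pixel_art",
--     "retro gaming": "pixel_art",
--     "3d render": "three_d_render",
--     "3d": "three_d_render",
--     "cgi": "three_d_render",
--     "blender": "three_d_render",
--     "sketch": "sketch_pencil",
--     "pencil": "sketch_pencil",
--     "hand-drawn": "sketch_pencil",
--     "comic": "comic_book",
--     "comic book": "comic_book",
--     "marvel": "comic_book",
--     "ukiyo-e": "ukiyo_e",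
--     "japanese woodblock": "ukiyo_e",
--     "art nouveau": "art_nouveau",
--     "decorative": "art_nouveau",
--     "cyberpunk": "cyberpunk",
--     "neon": "cyberpunk",
--     "futuristic": "cyberpunk",
--     "fantasy": "fantasy_art",
--     "magical": "fantasy_art",
--     "ethereal": "fantasy_art",
--     "minimalist": "minimalist",
--     "minimal": "minimalist",
--     "clean simple": "minimalist",
--     "surrealism": "surrealism",
--     "surreal": "surrealism",
--     "dreamlike": "surrealism",
--     "vintage photo": "vintage_photo",
--     "1970s": "vintage_photo",
--     "1980s": "vintage_photo",
--     "retro": "vintage_photo",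
--     "gothic": "gothic",
--     "dark dramatic": "gothic",
--     "pop art": "pop_art",
--     "warhol": "pop_art",
--     "lichtenstein": "pop_art",
-- }
--
-- def suggest_style_lora(prompt: str) -> Optional[str]:
--     """
--     Suggest a style LoRA name from prompt keywords (for auto-apply in inference).
--     Returns one of STYLE_DATASETS keys (e.g. cinematic, anime) or None.
--
--     Longest matching keyword wins to prefer "oil painting" over "oil".
--     """
--     if not prompt or not isinstance(prompt, str):
--         return None
--     prompt_lower = prompt.lower().strip()
--     best: Optional[Tuple[int, str]] = None  # (length, style_name)
--     for keyword, style_name in STYLE_KEYWORDS_TO_LORA.items():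
--         if keyword in prompt_lower:
--             if best is None or len(keyword) > best[0]:
--                 best = (len(keyword), style_name)
--     return best[1] if best else None
-- ===== SOURCE B (Python) =====
-- from typing import Optional
--
-- # Trigger table kept as compact "style:kw|kw|..." lines, one per style,
-- # in the same style order (and keyword order within a style) as the module dict.
-- _STYLE_TRIGGERS = [
--     "cinematic:cinematic|film|movie",
--     "anime:anime|manga",
--     "photorealistic:photorealistic|8k|professional photography",
--     "oil_painting:oil painting|oil paint|classical art",
--     "watercolor:watercolor|watercolour",
--     "digital_art:digital art|vector",
--     "concept_art:concept art|game design",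
--     "pixel_art:pixel art|pixel|retro gaming",
--     "three_d_render:3d render|3d|cgi|blender",
--     "sketch_pencil:sketch|pencil|hand-drawn",
--     "comic_book:comic|comic book|marvel",
--     "ukiyo_e:ukiyo-e|japanese woodblock",
--     "art_nouveau:art nouveau|decorative",
--     "cyberpunk:cyberpunk|neon|futuristic",
--     "fantasy_art:fantasy|magical|ethereal",
--     "minimalist:minimalist|minimal|clean simple",
--     "surrealism:surrealism|surreal|dreamlike",
--     "vintage_photo:vintage photo|1970s|1980s|retro",
--     "gothic:gothic|dark dramatic",
--     "pop_art:pop art|warhol|lichtenstein",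
-- ]
--
-- def _ranked_pairs():
--     pairs = []
--     for line in _STYLE_TRIGGERS:
--         style, kws = line.split(":")
--         for kw in kws.split("|"):
--             pairs.append((kw, style))
--     # stable sort: equal-length keywords keep table order,
--     # so the first hit below is exactly A's strict-> running maximum
--     pairs.sort(key=lambda p: len(p[0]), reverse=True)
--     return pairs
--
-- _RANKED = _ranked_pairs()
--
-- def suggest_style_lora(prompt: str) -> Optional[str]:
--     if not prompt or not isinstance(prompt, str):
--         return None
--     text = prompt.lower().strip()
--     for kw, style in _RANKED:
--         if kw in text:
--             return style
--     return None
-- ===== Notes on version B (the rewrite author's own statement) =====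
-- stated objective: alternative
-- what changed: Replaces the scan-all-keywords loop tracking a running (length, style) maximum with a compact style:keyword-list trigger table parsed once, flattened and stably sorted longest-keyword-first, returning the style of the first keyword found in the prompt.
import Mathlib
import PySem

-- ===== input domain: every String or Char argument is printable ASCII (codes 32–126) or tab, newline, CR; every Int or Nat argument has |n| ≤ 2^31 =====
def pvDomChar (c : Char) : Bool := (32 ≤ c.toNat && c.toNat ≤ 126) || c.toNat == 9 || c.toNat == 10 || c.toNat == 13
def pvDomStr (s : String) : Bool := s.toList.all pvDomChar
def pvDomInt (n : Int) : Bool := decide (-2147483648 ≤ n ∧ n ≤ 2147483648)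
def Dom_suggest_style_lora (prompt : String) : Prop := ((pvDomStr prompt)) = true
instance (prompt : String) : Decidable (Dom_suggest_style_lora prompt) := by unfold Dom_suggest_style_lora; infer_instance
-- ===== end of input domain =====

-- B replaces A's scan-all-keywords running-maximum with a compact "style:kw|kw" trigger
-- table parsed once, flattened, stably sorted longest-first, first match wins (alternative).


-- ===== PORT A =====
-- A's module-level dict, as an association list in insertion order
def STYLE_KEYWORDS_TO_LORA : List (String × String) :=
  [("cinematic", "cinematic"), ("film", "cinematic"), ("movie", "cinematic"),
   ("anime", "anime"), ("manga", "anime"),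
   ("photorealistic", "photorealistic"), ("8k", "photorealistic"),
   ("professional photography", "photorealistic"),
   ("oil painting", "oil_painting"), ("oil paint", "oil_painting"),
   ("classical art", "oil_painting"),
   ("watercolor", "watercolor"), ("watercolour", "watercolor"),
   ("digital art", "digital_art"), ("vector", "digital_art"),
   ("concept art", "concept_art"), ("game design", "concept_art"),
   ("pixel art", "pixel_art"), ("pixel", "pixel_art"), ("retro gaming", "pixel_art"),
   ("3d render", "three_d_render"), ("3d", "three_d_render"),
   ("cgi", "three_d_render"), ("blender", "three_d_render"),
   ("sketch", "sketch_pencil"), ("pencil", "sketch_pencil"),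
   ("hand-drawn", "sketch_pencil"),
   ("comic", "comic_book"), ("comic book", "comic_book"), ("marvel", "comic_book"),
   ("ukiyo-e", "ukiyo_e"), ("japanese woodblock", "ukiyo_e"),
   ("art nouveau", "art_nouveau"), ("decorative", "art_nouveau"),
   ("cyberpunk", "cyberpunk"), ("neon", "cyberpunk"), ("futuristic", "cyberpunk"),
   ("fantasy", "fantasy_art"), ("magical", "fantasy_art"), ("ethereal", "fantasy_art"),
   ("minimalist", "minimalist"), ("minimal", "minimalist"),
   ("clean simple", "minimalist"),
   ("surrealism", "surrealism"), ("surreal", "surrealism"), ("dreamlike", "surrealism"),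
   ("vintage photo", "vintage_photo"), ("1970s", "vintage_photo"),
   ("1980s", "vintage_photo"), ("retro", "vintage_photo"),
   ("gothic", "gothic"), ("dark dramatic", "gothic"),
   ("pop art", "pop_art"), ("warhol", "pop_art"), ("lichtenstein", "pop_art")]

-- loop body of A's for-loop (the running strict-maximum update), named for the fold
def styleBestStep (prompt_lower : String) (best : Option (Int × String))
    (kv : String × String) : Option (Int × String) :=
  if PySem.Str.isIn kv.1 prompt_lower then
    match best with
    | none => some (PySem.Str.len kv.1, kv.2)
    | some b =>
      if b.1 < PySem.Str.len kv.1 then some (PySem.Str.len kv.1, kv.2)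
      else some b
  else best

def suggest_style_lora (prompt : String) : Option String :=
  if prompt == "" then none
  else
    match STYLE_KEYWORDS_TO_LORA.foldl
        (styleBestStep (PySem.Str.strip (PySem.Str.lower prompt))) none with
    | some b => some b.2
    | none => none

-- ===== PORT B =====
-- B's compact trigger table: one "style:kw|kw|..." line per style
def styleTriggers : List String :=
  ["cinematic:cinematic|film|movie",
   "anime:anime|manga",
   "photorealistic:photorealistic|8k|professional photography",
   "oil_painting:oil painting|oil paint|classical art",
   "watercolor:watercolor|watercolour",
   "digital_art:digital art|vector",
   "concept_art:concept art|game design",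
   "pixel_art:pixel art|pixel|retro gaming",
   "three_d_render:3d render|3d|cgi|blender",
   "sketch_pencil:sketch|pencil|hand-drawn",
   "comic_book:comic|comic book|marvel",
   "ukiyo_e:ukiyo-e|japanese woodblock",
   "art_nouveau:art nouveau|decorative",
   "cyberpunk:cyberpunk|neon|futuristic",
   "fantasy_art:fantasy|magical|ethereal",
   "minimalist:minimalist|minimal|clean simple",
   "surrealism:surrealism|surreal|dreamlike",
   "vintage_photo:vintage photo|1970s|1980s|retro",
   "gothic:gothic|dark dramatic",
   "pop_art:pop art|warhol|lichtenstein"]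

-- one table line -> its (keyword, style) pairs (Source B's inner loop over kws.split("|"))
def parseLine (line : String) : List (String × String) :=
  match PySem.Str.split? line ":" with
  | some [style, kws] =>
    match PySem.Str.split? kws "|" with
    | some kwList => kwList.map (fun kw => (kw, style))
    | none => []
  | _ => []

-- parsed pairs, stably sorted by keyword length descending (Source B's _RANKED)
def rankedPairs : List (String × String) :=
  PySem.List.sorted (styleTriggers.flatMap parseLine) (fun p => PySem.Str.len p.1) true

-- early-exit scan: style of the first keyword contained in the text
def firstHit : List (String × String) → String → Option String
  | [], _ => none
  | p :: rest, text =>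
      if PySem.Str.isIn p.1 text then some p.2 else firstHit rest text

def suggest_style_lora_alt (prompt : String) : Option String :=
  if prompt == "" then none
  else firstHit rankedPairs (PySem.Str.strip (PySem.Str.lower prompt))

-- ===== PRECONDITION & SPEC =====
def Spec_suggest_style_lora (prompt : String) (out : Option String) : Prop := out = suggest_style_lora_alt prompt
instance (prompt : String) (out : Option String) : Decidable (Spec_suggest_style_lora prompt out) := by unfold Spec_suggest_style_lora; infer_instance

-- ===== CLAIM (what is proved, stated in full; the proofs are below) =====
def Claim_equal_suggest_style_lora : Prop := ∀ (prompt : String), Dom_suggest_style_lora prompt → Spec_suggest_style_lora prompt (suggest_style_lora prompt)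

-- ===== LEMMAS AND PROOFS =====

-- B's parsed-and-sorted table is exactly the stable descending sort of A's dict list
theorem rankedPairs_eq :
    rankedPairs =
      PySem.List.sorted STYLE_KEYWORDS_TO_LORA (fun kv => PySem.Str.len kv.1) true := by
  decide

-- the early-exit scan is find? followed by the style projection
theorem firstHit_eq_find (t : String) :
    ∀ (L : List (String × String)),
      firstHit L t = (List.find? (fun kv => PySem.Str.isIn kv.1 t) L).map (fun kv => kv.2) := by
  intro L
  induction L with
  | nil => simp [firstHit]
  | cons q rest ih =>
    simp only [firstHit, List.find?_cons]
    by_cases h : PySem.Str.isIn q.1 t = true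
    · simp only [h, if_pos]; rfl
    · rw [Bool.not_eq_true] at h
      simp only [h]
      simpa using ih

-- Inserting x into a key-descending sorted list (stably: after equal keys):
-- the first q-match is x exactly when x matches and strictly beats the previous first match.
theorem find?_insertBy_sorted {α : Type} (key : α → Int) (q : α → Bool) (x : α) :
    ∀ (S : List α), S.Pairwise (fun a b => key b ≤ key a) →
    List.find? q (PySem.List.insertBy (fun a b => decide (key b < key a)) x S) =
      (match List.find? q S with
       | none => if q x then some x else none
       | some m => if q x && decide (key m < key x) then some x else some m) := by
  intro S
  induction S with
  | nil => intro _; simp [PySem.List.insertBy, List.find?]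
  | cons y T ih =>
    intro hp
    have hpT : T.Pairwise (fun a b => key b ≤ key a) := hp.of_cons
    have hyT : ∀ b ∈ T, key b ≤ key y := (List.pairwise_cons.mp hp).1
    by_cases hlt : key y < key x
    · have hins : PySem.List.insertBy (fun a b => decide (key b < key a)) x (y :: T)
          = x :: y :: T := by
        simp [PySem.List.insertBy, hlt]
      rw [hins]
      cases hfind : List.find? q (y :: T) with
      | none => cases hqx : q x <;> simp [hqx, hfind]
      | some m =>
        have hkm : key m ≤ key y := by
          rcases List.mem_cons.mp (List.mem_of_find?_eq_some hfind) with hh | hh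
          · exact le_of_eq (congrArg key hh)
          · exact hyT m hh
        have hmx : key m < key x := lt_of_le_of_lt hkm hlt
        cases hqx : q x <;> simp [hqx, hfind, hmx]
    · have hins : PySem.List.insertBy (fun a b => decide (key b < key a)) x (y :: T)
          = y :: PySem.List.insertBy (fun a b => decide (key b < key a)) x T := by
        simp [PySem.List.insertBy, hlt]
      rw [hins]
      cases hqy : q y with
      | true => simp [hqy, hlt]
      | false =>
        rw [List.find?_cons]
        simp only [hqy]
        rw [ih hpT]
        simp [hqy]

-- A's running strict-maximum fold over L equals the first match of the stable
-- descending sort of L, tagged with its (length, style) pair.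
set_option maxHeartbeats 1000000 in
theorem foldl_best_eq_find_sorted (pl : String) (L : List (String × String)) :
    L.foldl (styleBestStep pl) none =
    (List.find? (fun kv => PySem.Str.isIn kv.1 pl)
        (PySem.List.sorted L (fun kv => PySem.Str.len kv.1) true)).map
      (fun kv => (PySem.Str.len kv.1, kv.2)) := by
  induction L using List.reverseRecOn with
  | nil => simp [PySem.List.sorted]
  | append_singleton L x ih =>
    rw [List.foldl_append, ih]
    have hs : PySem.List.sorted (L ++ [x]) (fun kv => PySem.Str.len kv.1) true =
        PySem.List.insertBy
          (fun a b => decide (PySem.Str.len b.1 < PySem.Str.len a.1)) x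
          (PySem.List.sorted L (fun kv => PySem.Str.len kv.1) true) := by
      rw [PySem.List.sorted_rev_eq_foldl_insertBy, PySem.List.sorted_rev_eq_foldl_insertBy,
        List.foldl_append]
      simp
    rw [hs,
      find?_insertBy_sorted (fun kv => PySem.Str.len kv.1)
        (fun kv => PySem.Str.isIn kv.1 pl) x _
        (PySem.List.sorted_pairwise_rev L (fun kv => PySem.Str.len kv.1))]
    simp only [List.foldl]
    cases hfind : List.find? (fun kv => PySem.Str.isIn kv.1 pl)
        (PySem.List.sorted L (fun kv => PySem.Str.len kv.1) true) with
    | none =>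
      cases hqx : PySem.Str.isIn x.1 pl <;>
        simp only [PySem.Str.isIn_eq] at hqx <;> simp [styleBestStep, hqx]
    | some m =>
      cases hqx : PySem.Str.isIn x.1 pl <;> simp only [PySem.Str.isIn_eq] at hqx
      · simp [styleBestStep, hqx]
      · by_cases hlt : m.1.length < x.1.length <;> simp [styleBestStep, hqx, hlt]

-- ===== VERDICT (by name: the statement is the Claim_ definition above) =====
theorem suggest_style_lora_spec : Claim_equal_suggest_style_lora := by
  intro prompt _
  unfold Spec_suggest_style_lora suggest_style_lora suggest_style_lora_alt
  by_cases h : (prompt == "") = true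
  · simp [h]
  · rw [if_neg h, if_neg h]
    rw [foldl_best_eq_find_sorted (PySem.Str.strip (PySem.Str.lower prompt))
      STYLE_KEYWORDS_TO_LORA]
    rw [firstHit_eq_find, rankedPairs_eq]
    cases List.find? (fun kv => PySem.Str.isIn kv.1 (PySem.Str.strip (PySem.Str.lower prompt)))
        (PySem.List.sorted STYLE_KEYWORDS_TO_LORA (fun kv => PySem.Str.len kv.1) true) with
    | none => simp
    | some kv => simp
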